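-- pv_equiv track=rewrite | github.com/venu912/cp_elective3 | 08-nth_additive_prime-Python/nth_additive_prime.py | additive_prime
-- ===== SOURCE A (Python) =====
-- def additive_prime(n):
-- 	sum=0
-- 	while(n):
-- 			m=n%10
-- 			sum=sum+m
-- 			n=n//10
-- 	if(isprime(sum)):
-- 			return sum
--
-- def isprime(x):
-- 		if(x<2):
-- 				return False
-- 		for i in range(2,x):
-- 				if(x%i==0):
-- 						return False
-- 		return True
-- ===== SOURCE B (Python) =====
-- def additive_prime(n):
--     s = 0
--     while n:
--         s += n % 10
--         n //= 10
--     if s < 2: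
--         return None
--     if s == 2:
--         return s
--     if s % 2 == 0:
--         return None
--     for i in range(3, s, 2):
--         if i * i > s:
--             break
--         if s % i == 0:
--             return None
--     return s
-- ===== Notes on version B (the rewrite author's own statement) =====
-- stated objective: alternative
-- what changed: Primality of the digit sum is tested by trial division only up to its square root (2 handled separately, then odd candidates with an early break once i*i exceeds the sum) instead of scanning every i in range(2, s); the digit-sum while-loop is kept verbatim.
import Mathlib
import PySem

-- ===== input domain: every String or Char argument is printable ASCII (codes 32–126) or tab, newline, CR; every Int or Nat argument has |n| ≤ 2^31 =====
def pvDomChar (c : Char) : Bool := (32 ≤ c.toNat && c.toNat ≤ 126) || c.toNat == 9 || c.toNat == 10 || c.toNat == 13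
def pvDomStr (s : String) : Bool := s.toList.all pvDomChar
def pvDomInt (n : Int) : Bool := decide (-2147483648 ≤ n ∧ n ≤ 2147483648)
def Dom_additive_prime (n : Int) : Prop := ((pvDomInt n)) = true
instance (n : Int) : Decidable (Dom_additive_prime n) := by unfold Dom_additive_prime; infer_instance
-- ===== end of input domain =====

-- B changes only the primality test: trial division stops at sqrt(s) (2 handled separately,
-- then odd candidates with an early break) instead of scanning all of range(2, s).

-- ===== PORT A =====
-- while(n): m = n%10; sum += m; n //= 10   (guard 0 < n makes the port total; the Python
-- loop diverges for n < 0, which Pre_ excludes)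
def dsLoopA (n sum : Int) : Int :=
  if h : 0 < n then dsLoopA (PySem.Int.floordiv n 10) (sum + PySem.Int.mod n 10) else sum
termination_by n.toNat
decreasing_by
  have h1 : PySem.Int.floordiv n 10 = n / 10 := PySem.Int.floordiv_eq_ediv_of_pos (by omega)
  rw [h1]; omega

-- for i in range(2, x): if x % i == 0: return False / return True  (early return = List.all)
def isprimeA (x : Int) : Bool :=
  if x < 2 then false
  else (PySem.List.pyRange 2 x 1).all (fun i => PySem.Int.mod x i != 0)

def additive_prime (n : Int) : Option Int :=
  let s := dsLoopA n 0
  if isprimeA s then some s else none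

-- ===== PORT B =====
def dsLoopB (n sum : Int) : Int :=
  if h : 0 < n then dsLoopB (PySem.Int.floordiv n 10) (sum + PySem.Int.mod n 10) else sum
termination_by n.toNat
decreasing_by
  have h1 : PySem.Int.floordiv n 10 = n / 10 := PySem.Int.floordiv_eq_ediv_of_pos (by omega)
  rw [h1]; omega

-- for i in range(3, s, 2): if i*i > s: break; if s % i == 0: return None  / return s
def oddScanB (s : Int) : List Int → Option Int
  | [] => some s
  | i :: rest =>
      if i * i > s then some s
      else if PySem.Int.mod s i = 0 then none
      else oddScanB s rest

def additive_prime_alt (n : Int) : Option Int :=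
  let s := dsLoopB n 0
  if s < 2 then none
  else if s = 2 then some s
  else if PySem.Int.mod s 2 = 0 then none
  else oddScanB s (PySem.List.pyRange 3 s 2)

-- ===== PRECONDITION & SPEC =====
-- Pre_ excludes n < 0, on which A's while-loop never terminates (n//10 stabilises at -1).
def Pre_additive_prime (n : Int) : Prop := 0 ≤ n
instance (n : Int) : Decidable (Pre_additive_prime n) := by unfold Pre_additive_prime; infer_instance
def pvWitness_additive_prime : Int := (23)

def Spec_additive_prime (n : Int) (out : Option Int) : Prop := out = additive_prime_alt n
instance (n : Int) (out : Option Int) : Decidable (Spec_additive_prime n out) := by unfold Spec_additive_prime; infer_instance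

-- ===== CLAIM (what is proved, stated in full; the proofs are below) =====
def Claim_equal_additive_prime : Prop := ∀ (n : Int), Dom_additive_prime n → Pre_additive_prime n → Spec_additive_prime n (additive_prime n)

-- ===== LEMMAS AND PROOFS =====

theorem dsLoopA_eq_dsLoopB (n sum : Int) : dsLoopA n sum = dsLoopB n sum := by
  induction n, sum using dsLoopA.induct with
  | case1 n sum h ih => rw [dsLoopA, dsLoopB]; simp only [h, dif_pos, ih]
  | case2 n sum h => rw [dsLoopA, dsLoopB]; simp [h]

theorem dsLoopA_lower (n sum : Int) (hn : 0 ≤ n) : sum ≤ dsLoopA n sum := by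
  induction n, sum using dsLoopA.induct with
  | case1 n sum h ih =>
      rw [dsLoopA]; simp only [h, dif_pos]
      have hm : 0 ≤ PySem.Int.mod n 10 := by
        rw [PySem.Int.mod_eq_emod_of_pos (by omega : (0:Int) < 10)]; omega
      calc sum ≤ sum + PySem.Int.mod n 10 := by omega
        _ ≤ _ := ih (by
          rw [PySem.Int.floordiv_eq_ediv_of_pos (by omega : (0:Int) < 10)]; omega)
  | case2 n sum h => rw [dsLoopA]; simp [h]

theorem dsLoopA_upper (k : Nat) (n sum : Int) (hn : 0 ≤ n) (hk : n < 10 ^ k) :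
    dsLoopA n sum ≤ sum + 9 * k := by
  induction k generalizing n sum with
  | zero =>
      have : n = 0 := by simpa using by omega
      rw [dsLoopA]; simp [this]
  | succ k ih =>
      rw [dsLoopA]
      split_ifs with h
      · have hd : PySem.Int.floordiv n 10 = n / 10 :=
          PySem.Int.floordiv_eq_ediv_of_pos (by omega)
        have hm : PySem.Int.mod n 10 = n % 10 :=
          PySem.Int.mod_eq_emod_of_pos (by omega)
        have h10 : (0:Int) ≤ n / 10 := by omega
        have hlt : n / 10 < 10 ^ k := by
          have := Int.emod_add_ediv n 10
          have h2 : n % 10 < 10 := by omega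
          have : n < 10 ^ (k+1) := hk
          rw [pow_succ] at this
          omega
        have := ih (n / 10) (sum + PySem.Int.mod n 10) h10 hlt
        rw [hd]
        have hm9 : PySem.Int.mod n 10 ≤ 9 := by rw [hm]; omega
        push_cast
        omega
      · omega

-- the two primality tails agree on every possible digit sum (0 ≤ s ≤ 90)
theorem tail_eq (k : Nat) (hk : k < 100) :
    (if isprimeA (k : Int) then some (k : Int) else none) =
    (if (k : Int) < 2 then none
     else if (k : Int) = 2 then some (k : Int)
     else if PySem.Int.mod (k : Int) 2 = 0 then none
     else oddScanB (k : Int) (PySem.List.pyRange 3 (k : Int) 2)) := by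
  revert hk
  revert k
  decide

-- ===== VERDICT (by name: the statement is the Claim_ definition above) =====
theorem additive_prime_spec : Claim_equal_additive_prime := by
  intro n hdom hpre
  unfold Spec_additive_prime additive_prime additive_prime_alt
  rw [← dsLoopA_eq_dsLoopB]
  have hdom' : n ≤ 2147483648 := by
    have := of_decide_eq_true hdom
    simp at this
    omega
  have hlo : (0:Int) ≤ dsLoopA n 0 := dsLoopA_lower n 0 hpre
  have hhi : dsLoopA n 0 ≤ 0 + 9 * (10 : Nat) := by
    apply dsLoopA_upper 10 n 0 hpre
    omega
  set s := dsLoopA n 0 with hs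
  obtain ⟨k, hk⟩ : ∃ k : Nat, s = (k : Int) := ⟨s.toNat, by omega⟩
  rw [hk]
  exact tail_eq k (by omega)
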